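-- pv_equiv track=rewrite | github.com/MALGEPAV/GB_DE_PYTHON_DZ | DZ3/task4.py | things_to_pack
-- ===== SOURCE A (Python) =====
-- def things_to_pack(things_with_weights: dict, weight_capacity: int) -> tuple:
--     overall_weight = 0
--     things_list = []
--
--     while things_with_weights:
--         some_thing = list(things_with_weights.keys())[0]
--         some_weight = things_with_weights.pop(some_thing)
--
--         if overall_weight + some_weight > weight_capacity:
--             continue
--
--         overall_weight += some_weight
--         things_list.append(some_thing)
--
--     return things_list, overall_weight
-- ===== SOURCE B (Python) =====
-- def things_to_pack(things_with_weights: dict, weight_capacity: int) -> tuple: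
--     # Single pass over the items in insertion order; does NOT mutate the dict
--     # (A empties it). Same return value.
--     things_list = []
--     overall_weight = 0
--     for thing, weight in things_with_weights.items():
--         if overall_weight + weight <= weight_capacity:
--             things_list.append(thing)
--             overall_weight += weight
--     return things_list, overall_weight
-- ===== Notes on version B (the rewrite author's own statement) =====
-- stated objective: faster
-- what changed: A repeatedly materialises list(keys())[0] and pops from the dict inside a while-loop (quadratic, and it empties the caller's dict); B is one non-mutating for-loop over items() that accumulates when the item fits.
import Mathlib
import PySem

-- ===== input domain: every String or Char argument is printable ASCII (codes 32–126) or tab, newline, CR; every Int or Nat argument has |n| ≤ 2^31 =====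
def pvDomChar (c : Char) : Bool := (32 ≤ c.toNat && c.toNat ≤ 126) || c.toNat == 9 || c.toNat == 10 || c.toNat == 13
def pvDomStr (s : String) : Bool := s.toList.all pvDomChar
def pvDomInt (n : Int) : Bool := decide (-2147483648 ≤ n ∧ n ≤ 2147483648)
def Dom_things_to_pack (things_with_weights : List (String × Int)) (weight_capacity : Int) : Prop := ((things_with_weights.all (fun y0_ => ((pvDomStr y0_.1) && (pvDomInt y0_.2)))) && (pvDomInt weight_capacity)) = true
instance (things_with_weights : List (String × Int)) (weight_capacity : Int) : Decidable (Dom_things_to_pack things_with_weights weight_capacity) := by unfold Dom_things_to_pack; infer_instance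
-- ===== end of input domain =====

-- B replaces A's quadratic while-loop (list(keys())[0] + dict.pop each round, which also
-- empties the caller's dict) by a single non-mutating pass over items(); the equivalence
-- proved is about the RETURN value only (A mutates its dict argument, B does not).

-- ===== PORT A =====
-- termination fact the while-loop needs: a successful pop shrinks the dict
theorem pvFindFilterLt {kappa nu : Type} [BEq kappa] (k : kappa) :
    ∀ (l : List (kappa × nu)), l.find? (fun p => p.1 == k) ≠ none →
      (l.filter (fun p => !(p.1 == k))).length < l.length
  | [], h => by simp at h
  | p :: t, h => by
    by_cases hpk : (p.1 == k) = true
    · have hfe : (p :: t).filter (fun q => !(q.1 == k)) = t.filter (fun q => !(q.1 == k)) := by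
        simp [hpk]
      rw [hfe]
      exact Nat.lt_succ_of_le (List.length_filter_le _ t)
    · have hb : (p.1 == k) = false := by simpa using hpk
      simp only [List.find?_cons, hb] at h
      have ih := pvFindFilterLt k t h
      have hfe : (p :: t).filter (fun q => !(q.1 == k)) = p :: t.filter (fun q => !(q.1 == k)) := by
        simp [hb]
      rw [hfe]
      simpa using Nat.succ_lt_succ ih

theorem pvPopLt {d : PySem.Dict String Int} {k : String} {v : Int}
    {d' : PySem.Dict String Int} (hp : d.pop? k = some (v, d')) :
    d'.items.length < d.items.length := by
  unfold PySem.Dict.pop? at hp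
  cases hget : d.get? k with
  | none => rw [hget] at hp; simp at hp
  | some w =>
    rw [hget] at hp
    simp only [Option.map_some, Option.some.injEq, Prod.mk.injEq] at hp
    obtain ⟨-, rfl⟩ := hp
    have hfind : d.items.find? (fun p => p.1 == k) ≠ none := by
      unfold PySem.Dict.get? at hget
      cases hf : d.items.find? (fun p => p.1 == k) <;> simp [hf] at hget ⊢
    simpa [PySem.Dict.erase] using pvFindFilterLt k d.items hfind

-- while things_with_weights: some_thing = list(keys())[0]; some_weight = pop(some_thing); …
def packLoopA (weight_capacity : Int) (d : PySem.Dict String Int)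
    (overall_weight : Int) (things_list : List String) : List String × Int :=
  match d with
  | ⟨[]⟩ => (things_list, overall_weight)
  | ⟨(some_thing, w0) :: tl⟩ =>
    match hp : (PySem.Dict.mk ((some_thing, w0) :: tl)).pop? some_thing with
    | none => (things_list, overall_weight)  -- unreachable: the first key is present
    | some (some_weight, d') =>
      if overall_weight + some_weight > weight_capacity then
        packLoopA weight_capacity d' overall_weight things_list
      else
        packLoopA weight_capacity d' (overall_weight + some_weight)
          (things_list ++ [some_thing])
termination_by d.items.length
decreasing_by
  · exact pvPopLt hp
  · exact pvPopLt hp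

def things_to_pack (things_with_weights : List (String × Int)) (weight_capacity : Int) : List String × Int :=
  packLoopA weight_capacity (PySem.Dict.mk things_with_weights) 0 []

-- ===== PORT B =====
def things_to_pack_alt (things_with_weights : List (String × Int)) (weight_capacity : Int) : List String × Int :=
  things_with_weights.foldl
    (fun acc kv =>
      if acc.2 + kv.2 ≤ weight_capacity then (acc.1 ++ [kv.1], acc.2 + kv.2) else acc)
    ([], 0)

-- ===== PRECONDITION & SPEC =====
-- Pre_ excludes association lists with duplicate keys: a Python dict cannot contain
-- them, so such lists do not represent any input A's dict parameter can take.
def Pre_things_to_pack (things_with_weights : List (String × Int)) (weight_capacity : Int) : Prop :=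
  (things_with_weights.map Prod.fst).Nodup

instance (things_with_weights : List (String × Int)) (weight_capacity : Int) : Decidable (Pre_things_to_pack things_with_weights weight_capacity) := by unfold Pre_things_to_pack; infer_instance

def pvWitness_things_to_pack : (List (String × Int)) × Int := ([("pen", 2), ("book", 3), ("laptop", 4)], 6)

def Spec_things_to_pack (things_with_weights : List (String × Int)) (weight_capacity : Int) (out : List String × Int) : Prop := out = things_to_pack_alt things_with_weights weight_capacity
instance (things_with_weights : List (String × Int)) (weight_capacity : Int) (out : List String × Int) : Decidable (Spec_things_to_pack things_with_weights weight_capacity out) := by unfold Spec_things_to_pack; infer_instance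

-- ===== CLAIM (what is proved, stated in full; the proofs are below) =====
def Claim_equal_things_to_pack : Prop := ∀ (things_with_weights : List (String × Int)) (weight_capacity : Int), Dom_things_to_pack things_with_weights weight_capacity → Pre_things_to_pack things_with_weights weight_capacity → Spec_things_to_pack things_with_weights weight_capacity (things_to_pack things_with_weights weight_capacity)

-- ===== LEMMAS AND PROOFS =====
theorem pvPop_cons (k : String) (v : Int) (t : List (String × Int))
    (hk : ∀ p ∈ t, p.1 ≠ k) :
    (PySem.Dict.mk ((k, v) :: t)).pop? k = some (v, PySem.Dict.mk t) := by
  have hfilter : t.filter (fun p => !(p.1 == k)) = t :=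
    List.filter_eq_self.2 (fun p hp => by simpa using hk p hp)
  simp [PySem.Dict.pop?, PySem.Dict.get?, PySem.Dict.erase, hfilter]

theorem pvLoop_eq (cap : Int) :
    ∀ (l : List (String × Int)), (l.map Prod.fst).Nodup → ∀ (ov : Int) (ts : List String),
      packLoopA cap (PySem.Dict.mk l) ov ts =
        l.foldl (fun acc kv =>
          if acc.2 + kv.2 ≤ cap then (acc.1 ++ [kv.1], acc.2 + kv.2) else acc) (ts, ov)
  | [], _, ov, ts => by rw [packLoopA]; rfl
  | (k, v) :: t, hn, ov, ts => by
    simp only [List.map_cons, List.nodup_cons, List.mem_map] at hn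
    have hk : ∀ p ∈ t, p.1 ≠ k := fun p hp h => hn.1 ⟨p, hp, h⟩
    have hpop := pvPop_cons k v t hk
    rw [packLoopA]
    split
    · next heq =>
        rw [hpop] at heq
        cases heq
    · next w rest heq =>
        rw [hpop] at heq
        simp only [Option.some.injEq, Prod.mk.injEq] at heq
        obtain ⟨rfl, rfl⟩ := heq
        simp only [List.foldl_cons]
        by_cases hle : ov + v ≤ cap
        · rw [if_neg (show ¬(ov + v > cap) by omega), if_pos hle]
          exact pvLoop_eq cap t hn.2 (ov + v) (ts ++ [k])
        · rw [if_pos (show ov + v > cap by omega), if_neg hle]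
          exact pvLoop_eq cap t hn.2 ov ts

-- ===== VERDICT (by name: the statement is the Claim_ definition above) =====
theorem things_to_pack_spec : Claim_equal_things_to_pack := by
  intro twws cap _ hpre
  unfold Spec_things_to_pack things_to_pack things_to_pack_alt
  exact pvLoop_eq cap twws hpre 0 []
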